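-- pv_equiv track=rewrite | github.com/bballdave025/mendeleev-spelling-bee | mendeleevspellingbee/utils.py | find_element_words
-- ===== SOURCE A (Python) =====
-- def find_element_words(words, symbols):
--     matches = []
--     for word in words:
--         paths = []
--         def dfs(subword, path):
--             if not subword:
--                 paths.append(path[:])
--                 return
--             for sym in symbols:
--                 if subword.startswith(sym.lower()):
--                     path.append(sym)
--                     dfs(subword[len(sym):], path)
--                     path.pop()
--         dfs(word, [])
--         if paths:
--             matches.append((word, paths[0]))
--     return matches
-- ===== SOURCE B (Python) =====
-- def find_element_words(words, symbols):
--     lowered = [(s, s.lower()) for s in symbols]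
--     matches = []
--     for word in words:
--         # sol[j] = first decomposition of the suffix word[i+j:] (None if impossible),
--         # built back to front; after the loop sol[0] covers the whole word.
--         sol = [[]]  # table for the empty suffix
--         for i in range(len(word) - 1, -1, -1):
--             suffix = word[i:]
--             row = None
--             for sym, low in lowered:
--                 if low and suffix.startswith(low) and sol[len(low) - 1] is not None:
--                     row = [sym] + sol[len(low) - 1]
--                     break
--             sol.insert(0, row)
--         if sol[0] is not None:
--             matches.append((word, sol[0]))
--     return matches
-- ===== Notes on version B (the rewrite author's own statement) =====
-- stated objective: faster
-- what changed: A enumerates every decomposition of each word by exhaustive DFS and keeps only the first; B builds, back to front, a dynamic-programming table of the first decomposition of each suffix, so each word costs one pass over positions x symbols instead of exploring all decompositions.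
import Mathlib
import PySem

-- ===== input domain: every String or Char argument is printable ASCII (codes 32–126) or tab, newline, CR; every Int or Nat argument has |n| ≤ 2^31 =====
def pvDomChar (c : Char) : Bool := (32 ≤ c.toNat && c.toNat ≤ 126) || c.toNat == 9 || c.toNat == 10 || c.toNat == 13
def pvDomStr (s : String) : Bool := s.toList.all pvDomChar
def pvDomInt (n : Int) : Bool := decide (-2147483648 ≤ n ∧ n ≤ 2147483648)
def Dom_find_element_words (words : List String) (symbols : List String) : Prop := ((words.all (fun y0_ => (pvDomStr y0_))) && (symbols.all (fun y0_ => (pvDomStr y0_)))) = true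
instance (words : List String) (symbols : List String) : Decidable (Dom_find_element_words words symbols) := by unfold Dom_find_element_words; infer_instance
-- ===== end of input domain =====

-- B replaces A's exhaustive enumeration of ALL decompositions per word by a back-to-front
-- dynamic-programming table of the first decomposition of each suffix (objective: faster).


-- ===== PORT A =====
-- A's dfs enumerates every decomposition of `subword` into lowered symbols, in symbol order,
-- accumulating the full paths. Python strings are handled on the List Char side (PySem.Chars);
-- subword[len(sym):] is PySem.List.slice. Python's dfs has no bound; the port carries fuel
-- word.length + 1, which suffices on every input where Python's dfs terminates (each step
-- consumes ≥ 1 character unless a symbol is "", in which case Python raises RecursionError —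
-- excluded by Pre_).
def pvDfsA (symbols : List String) : Nat → List Char → List String → List (List String)
  | 0, _, _ => []
  | fuel + 1, subword, path =>
    if subword = [] then [path]
    else
      symbols.foldl
        (fun acc sym =>
          if PySem.Chars.startswith subword (PySem.Chars.lower sym.toList) then
            acc ++ pvDfsA symbols fuel
              (PySem.List.slice subword (some (sym.toList.length : Int)) none)
              (path ++ [sym])
          else acc)
        []

def find_element_words (words : List String) (symbols : List String) : List (String × List String) :=
  words.foldl
    (fun ms word =>
      match pvDfsA symbols (word.toList.length + 1) word.toList [] with
      | [] => ms                      -- `if paths:` false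
      | p :: _ => ms ++ [(word, p)])  -- append (word, paths[0])
    []

-- ===== PORT B =====
-- B builds, for each word and back to front, the table of per-suffix first decompositions.
-- The inner `for sym, low in lowered: … break` with fall-through row = None is findSome?;
-- sol[len(low)-1] of the previous table is tab.getD (low.length - 1) none (the table for the
-- rest of the word has entry j = suffix dropping j+1 more characters). The Python loop over
-- positions n-1 … 0 prepending rows is the structural recursion on the suffix.
def pvRowB (lowered : List (String × List Char)) (suf : List Char)
    (tab : List (Option (List String))) : Option (List String) :=
  lowered.findSome? (fun p =>
    if p.2 ≠ [] ∧ PySem.Chars.startswith suf p.2 then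
      (tab.getD (p.2.length - 1) none).map (fun rest => p.1 :: rest)
    else none)

def pvTableB (lowered : List (String × List Char)) : List Char → List (Option (List String))
  | [] => [some []]
  | c :: rest => pvRowB lowered (c :: rest) (pvTableB lowered rest) :: pvTableB lowered rest

def find_element_words_alt (words : List String) (symbols : List String) : List (String × List String) :=
  let lowered := symbols.map (fun s => (s, PySem.Chars.lower s.toList))
  words.foldl
    (fun ms word =>
      match (pvTableB lowered word.toList).getD 0 none with
      | some path => ms ++ [(word, path)]
      | none => ms)
    []

-- ===== PRECONDITION & SPEC =====
-- Pre_ excludes symbol lists containing the empty string when some word is nonempty: there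
-- A's dfs matches "" forever and Python raises RecursionError (no value is returned).
def Pre_find_element_words (words : List String) (symbols : List String) : Prop :=
  "" ∉ symbols ∨ ∀ w ∈ words, w = ""
instance (words : List String) (symbols : List String) : Decidable (Pre_find_element_words words symbols) := by unfold Pre_find_element_words; infer_instance

def pvWitness_find_element_words : List String × List String := (["he", "zz"], ["H", "E"])

def Spec_find_element_words (words : List String) (symbols : List String) (out : List (String × List String)) : Prop := out = find_element_words_alt words symbols
instance (words : List String) (symbols : List String) (out : List (String × List String)) : Decidable (Spec_find_element_words words symbols out) := by unfold Spec_find_element_words; infer_instance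

-- ===== CLAIM (what is proved, stated in full; the proofs are below) =====
def Claim_equal_find_element_words : Prop := ∀ (words : List String) (symbols : List String), Dom_find_element_words words symbols → Pre_find_element_words words symbols → Spec_find_element_words words symbols (find_element_words words symbols)

-- ===== LEMMAS AND PROOFS =====

-- findSome? congruence on members (specific loop-shape helper for the proofs below)
theorem pvFindSome?_congr_mem {α β : Type} (f g : α → Option β) :
    ∀ (l : List α), (∀ a ∈ l, f a = g a) → l.findSome? f = l.findSome? g := by
  intro l
  induction l with
  | nil => intro _; rfl
  | cons a rest ih =>
    intro h
    rw [List.findSome?_cons, List.findSome?_cons, h a (by simp)]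
    cases g a with
    | some b => rfl
    | none => exact ih (fun x hx => h x (by simp [hx]))

-- Ghost early-exit DFS (proof-side only): the first decomposition of `subword`, with fuel.
def pvSpellB (symbols : List String) : Nat → List Char → Option (List String)
  | 0, _ => none
  | fuel + 1, subword =>
    if subword = [] then some []
    else
      symbols.findSome? (fun sym =>
        if sym ≠ "" ∧ PySem.Chars.startswith subword (PySem.Chars.lower sym.toList) then
          (pvSpellB symbols fuel
            (PySem.List.slice subword (some (sym.toList.length : Int)) none)).map
            (fun rest => sym :: rest)
        else none)

-- Head of A's path list = the ghost DFS's first decomposition, prefixed by the accumulated path.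
theorem pvDfsA_head (symbols : List String) (hns : "" ∉ symbols) :
    ∀ (fuel : Nat) (subword : List Char) (path : List String), subword.length < fuel →
      (pvDfsA symbols fuel subword path).head? =
        (pvSpellB symbols fuel subword).map (fun t => path ++ t) := by
  intro fuel
  induction fuel with
  | zero => intro subword path h; omega
  | succ fuel ih =>
    intro subword path hlen
    by_cases hsub : subword = []
    · subst hsub
      simp [pvDfsA, pvSpellB]
    · rw [pvDfsA, if_neg hsub, pvSpellB, if_neg hsub]
      have hfold :
          List.foldl
            (fun acc sym =>
              if PySem.Chars.startswith subword (PySem.Chars.lower sym.toList) then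
                acc ++ pvDfsA symbols fuel
                  (PySem.List.slice subword (some (sym.toList.length : Int)) none)
                  (path ++ [sym])
              else acc)
            [] symbols =
          List.foldl
            (fun acc sym =>
              acc ++ (if PySem.Chars.startswith subword (PySem.Chars.lower sym.toList) then
                pvDfsA symbols fuel
                  (PySem.List.slice subword (some (sym.toList.length : Int)) none)
                  (path ++ [sym])
              else []))
            [] symbols :=
        by apply PySem.List.foldl_congr_mem; intro acc sym _; split <;> simp
      rw [hfold, PySem.List.foldl_append_eq_flatMap]
      simp only [List.nil_append]
      -- inner loop: induction over the symbol list being scanned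
      have main : ∀ syms : List String, (∀ s ∈ syms, s ∈ symbols) →
          (syms.flatMap (fun sym =>
            if PySem.Chars.startswith subword (PySem.Chars.lower sym.toList) then
              pvDfsA symbols fuel
                (PySem.List.slice subword (some (sym.toList.length : Int)) none)
                (path ++ [sym])
            else [])).head? =
          (syms.findSome? (fun sym =>
            if sym ≠ "" ∧ PySem.Chars.startswith subword (PySem.Chars.lower sym.toList) then
              (pvSpellB symbols fuel
                (PySem.List.slice subword (some (sym.toList.length : Int)) none)).map
                (fun rest => sym :: rest)
            else none)).map (fun t => path ++ t) := by
        intro syms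
        induction syms with
        | nil => intro _; simp
        | cons sym rest ihs =>
          intro hmem
          have hsymne : sym ≠ "" := fun he => hns (by simpa [he] using hmem sym (by simp))
          rw [List.flatMap_cons, List.head?_append, List.findSome?_cons]
          by_cases hsw : PySem.Chars.startswith subword (PySem.Chars.lower sym.toList)
          · have hcond : sym ≠ "" ∧ PySem.Chars.startswith subword (PySem.Chars.lower sym.toList) :=
              ⟨hsymne, hsw⟩
            rw [if_pos hsw, if_pos hcond]
            have hdrop :
                (PySem.List.slice subword (some (sym.toList.length : Int)) none).length < fuel := by
              have hpre := (PySem.Chars.startswith_iff subword (PySem.Chars.lower sym.toList)).1 hsw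
              have hle : (PySem.Chars.lower sym.toList).length ≤ subword.length := hpre.length_le
              have hlow : (PySem.Chars.lower sym.toList).length = sym.toList.length := by
                simp [PySem.Chars.lower]
              have hne : sym.toList ≠ [] := fun hh => hsymne (String.toList_inj.1 (by simpa using hh))
              have hpos : 0 < sym.toList.length := List.length_pos_iff.2 hne
              rw [PySem.List.slice_from_natCast]
              simp only [List.length_drop]
              omega
            rw [ih _ (path ++ [sym]) hdrop]
            cases hsp : pvSpellB symbols fuel
                (PySem.List.slice subword (some (sym.toList.length : Int)) none) with
            | some tail => simp
            | none =>
              simp only [Option.map_none, Option.none_or]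
              exact ihs (fun s hs => hmem s (by simp [hs]))
          · rw [if_neg hsw, if_neg (fun hc => hsw hc.2)]
            simp only [List.head?_nil, Option.none_or]
            exact ihs (fun s hs => hmem s (by simp [hs]))
      exact main symbols (fun _ h => h)

-- The ghost DFS's result does not depend on the fuel, as long as it exceeds the length.
theorem pvSpellB_fuel (symbols : List String) :
    ∀ (f₁ : Nat) (subword : List Char) (f₂ : Nat), subword.length < f₁ → subword.length < f₂ →
      pvSpellB symbols f₁ subword = pvSpellB symbols f₂ subword := by
  intro f₁
  induction f₁ with
  | zero => intro subword f₂ h; omega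
  | succ f₁ ih =>
    intro subword f₂ h1 h2
    cases f₂ with
    | zero => omega
    | succ f₂ =>
      by_cases hsub : subword = []
      · subst hsub; simp [pvSpellB]
      · rw [pvSpellB, pvSpellB, if_neg hsub, if_neg hsub]
        apply pvFindSome?_congr_mem
        intro sym _
        by_cases hc : sym ≠ "" ∧ PySem.Chars.startswith subword (PySem.Chars.lower sym.toList)
        · rw [if_pos hc, if_pos hc]
          have hdrop : (PySem.List.slice subword (some (sym.toList.length : Int)) none).length
              < subword.length := by
            have hpre := (PySem.Chars.startswith_iff subword (PySem.Chars.lower sym.toList)).1 hc.2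
            have hle : (PySem.Chars.lower sym.toList).length ≤ subword.length := hpre.length_le
            have hlow : (PySem.Chars.lower sym.toList).length = sym.toList.length := by
              simp [PySem.Chars.lower]
            have hne : sym.toList ≠ [] := fun hh => hc.1 (String.toList_inj.1 (by simpa using hh))
            have hpos : 0 < sym.toList.length := List.length_pos_iff.2 hne
            have hnil : subword ≠ [] := hsub
            have hposs : 0 < subword.length := List.length_pos_iff.2 hnil
            rw [PySem.List.slice_from_natCast]
            simp only [List.length_drop]
            omega
          rw [ih _ f₂ (by omega) (by omega)]
        · rw [if_neg hc, if_neg hc]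

-- B's DP table entry j is the ghost DFS's result on the suffix dropping j characters.
theorem pvTableB_spec (symbols : List String) :
    ∀ (suf : List Char) (j : Nat), j ≤ suf.length →
      (pvTableB (symbols.map (fun s => (s, PySem.Chars.lower s.toList))) suf).getD j none =
        pvSpellB symbols ((suf.drop j).length + 1) (suf.drop j) := by
  intro suf
  induction suf with
  | nil =>
    intro j hj
    have hj0 : j = 0 := by simpa using hj
    subst hj0
    simp [pvTableB, pvSpellB]
  | cons c rest ih =>
    intro j hj
    cases j with
    | succ j' =>
      have : (pvTableB (symbols.map (fun s => (s, PySem.Chars.lower s.toList))) (c :: rest)).getD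
          (j' + 1) none =
          (pvTableB (symbols.map (fun s => (s, PySem.Chars.lower s.toList))) rest).getD j' none := by
        simp [pvTableB]
      rw [this, ih j' (by simpa using hj)]
      simp
    | zero =>
      simp only [List.drop_zero]
      have hne : (c :: rest) ≠ ([] : List Char) := by simp
      rw [pvSpellB, if_neg hne]
      rw [pvTableB]
      simp only [List.getD_cons_zero]
      rw [pvRowB, List.findSome?_map]
      apply pvFindSome?_congr_mem
      intro sym _
      simp only [Function.comp]
      have hlow : (PySem.Chars.lower sym.toList).length = sym.toList.length := by
        simp [PySem.Chars.lower]
      have hguard : ((PySem.Chars.lower sym.toList ≠ []) ∧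
            PySem.Chars.startswith (c :: rest) (PySem.Chars.lower sym.toList)) ↔
          ((sym ≠ "") ∧ PySem.Chars.startswith (c :: rest) (PySem.Chars.lower sym.toList)) := by
        constructor
        · rintro ⟨h1, h2⟩
          refine ⟨fun he => h1 ?_, h2⟩
          subst he; simp [PySem.Chars.lower]
        · rintro ⟨h1, h2⟩
          refine ⟨fun he => h1 ?_, h2⟩
          have : sym.toList = [] := by
            have := congrArg List.length he
            rw [hlow] at this
            simpa using this
          exact String.toList_inj.1 (by simpa using this)
      by_cases hc : (sym ≠ "") ∧ PySem.Chars.startswith (c :: rest) (PySem.Chars.lower sym.toList)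
      · rw [if_pos (hguard.2 hc), if_pos hc]
        have hpre := (PySem.Chars.startswith_iff (c :: rest) (PySem.Chars.lower sym.toList)).1 hc.2
        have hle : (PySem.Chars.lower sym.toList).length ≤ (c :: rest).length := hpre.length_le
        have hnes : sym.toList ≠ [] := fun hh => hc.1 (String.toList_inj.1 (by simpa using hh))
        have hpos : 0 < sym.toList.length := List.length_pos_iff.2 hnes
        have hlen : sym.toList.length ≤ rest.length + 1 := by
          rw [hlow] at hle; simpa using hle
        have hidx : sym.toList.length - 1 ≤ rest.length := by omega
        rw [hlow, ih (sym.toList.length - 1) hidx]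
        obtain ⟨k, hk⟩ : ∃ k, sym.toList.length = k + 1 :=
          ⟨sym.toList.length - 1, by omega⟩
        have hdropeq : rest.drop (sym.toList.length - 1) = (c :: rest).drop sym.toList.length := by
          rw [hk]; simp [List.drop_succ_cons]
        rw [hdropeq, PySem.List.slice_from_natCast]
        rw [pvSpellB_fuel symbols ((List.drop sym.toList.length (c :: rest)).length + 1)
          (List.drop sym.toList.length (c :: rest)) (c :: rest).length
          (by simp only [List.length_drop]; omega)
          (by simp only [List.length_drop, List.length_cons]; omega)]
      · rw [if_neg (fun hh => hc (hguard.1 hh)), if_neg hc]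

-- per-word: A's paths[0] behaviour coincides with B's table head
theorem per_word (symbols : List String) (word : String)
    (h : "" ∉ symbols ∨ word = "") :
    (pvDfsA symbols (word.toList.length + 1) word.toList []).head? =
      (pvTableB (symbols.map (fun s => (s, PySem.Chars.lower s.toList))) word.toList).getD 0 none := by
  have htab := pvTableB_spec symbols word.toList 0 (by omega)
  simp only [List.drop_zero] at htab
  rw [htab]
  rcases h with hns | hw
  · have := pvDfsA_head symbols hns (word.toList.length + 1) word.toList [] (by omega)
    simpa using this
  · subst hw
    simp [pvDfsA, pvSpellB]

theorem step_eq (symbols : List String) (word : String)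
    (h : "" ∉ symbols ∨ word = "") (ms : List (String × List String)) :
    (match pvDfsA symbols (word.toList.length + 1) word.toList [] with
      | [] => ms
      | p :: _ => ms ++ [(word, p)]) =
    (match (pvTableB (symbols.map (fun s => (s, PySem.Chars.lower s.toList))) word.toList).getD 0 none with
      | some path => ms ++ [(word, path)]
      | none => ms) := by
  have hh := per_word symbols word h
  cases hA : pvDfsA symbols (word.toList.length + 1) word.toList [] with
  | nil =>
    rw [hA] at hh
    simp only [List.head?_nil] at hh
    rw [← hh]
  | cons p rest =>
    rw [hA] at hh
    simp only [List.head?_cons] at hh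
    rw [← hh]

theorem foldl_eq (symbols : List String) :
    ∀ (ws : List String), (∀ w ∈ ws, "" ∉ symbols ∨ w = "") →
      ∀ (acc : List (String × List String)),
      ws.foldl (fun ms word =>
        match pvDfsA symbols (word.toList.length + 1) word.toList [] with
        | [] => ms
        | p :: _ => ms ++ [(word, p)]) acc =
      ws.foldl (fun ms word =>
        match (pvTableB (symbols.map (fun s => (s, PySem.Chars.lower s.toList))) word.toList).getD 0 none with
        | some path => ms ++ [(word, path)]
        | none => ms) acc := by
  intro ws
  induction ws with
  | nil => intro _ acc; rfl
  | cons w rest ihw =>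
    intro hmem acc
    simp only [List.foldl_cons]
    rw [step_eq symbols w (hmem w (by simp)) acc]
    exact ihw (fun x hx => hmem x (by simp [hx])) _

-- ===== VERDICT (by name: the statements are the Claim_ definitions above) =====
theorem find_element_words_spec : Claim_equal_find_element_words := by
  intro words symbols _ hpre
  unfold Spec_find_element_words find_element_words find_element_words_alt
  exact foldl_eq symbols words
    (fun w hw => hpre.imp id (fun hall => hall w hw)) []
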